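-- pv_equiv track=rewrite | github.com/abid8195/EnG_ProjectA | app.py | infer_label_column
-- ===== SOURCE A (Python) =====
-- def infer_label_column(columns):
--     """
--     Detect likely label column from uploaded or built-in dataset.
--     """
--     candidates = [
--         "label",
--         "class",
--         "target",
--         "y",
--         "outcome",
--         "species",
--         "result",
--         "prediction"
--     ]
--
--     lower_map = {
--         str(col).strip().lower(): col
--         for col in columns
--     }
--
--     for candidate in candidates:
--         if candidate in lower_map:
--             return lower_map[candidate]
--
--     return columns[-1] if columns else None
-- ===== SOURCE B (Python) =====
-- def infer_label_column(columns):
--     """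
--     Detect likely label column from uploaded or built-in dataset.
--     Single pass over columns keeping the best-ranked (highest-priority) candidate
--     match; on equal rank the later column wins.
--     """
--     candidates = [
--         "label",
--         "class",
--         "target",
--         "y",
--         "outcome",
--         "species",
--         "result",
--         "prediction"
--     ]
--
--     def rank(name):
--         i = 0
--         for c in candidates:
--             if c == name:
--                 return i
--             i += 1
--         return None
--
--     best = None
--     for col in columns:
--         r = rank(str(col).strip().lower())
--         if r is not None and (best is None or r <= best[0]):
--             best = (r, col)
--
--     if best is not None:
--         return best[1]
--     return columns[-1] if columns else None
-- ===== Notes on version B (the rewrite author's own statement) =====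
-- stated objective: alternative
-- what changed: Replaces A's up-front lowercase dict plus candidate-priority loop with a single pass over the columns that keeps the column of minimal candidate rank (later column wins ties, mirroring dict overwrite), with the same empty/last-column fallback.
import Mathlib
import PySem

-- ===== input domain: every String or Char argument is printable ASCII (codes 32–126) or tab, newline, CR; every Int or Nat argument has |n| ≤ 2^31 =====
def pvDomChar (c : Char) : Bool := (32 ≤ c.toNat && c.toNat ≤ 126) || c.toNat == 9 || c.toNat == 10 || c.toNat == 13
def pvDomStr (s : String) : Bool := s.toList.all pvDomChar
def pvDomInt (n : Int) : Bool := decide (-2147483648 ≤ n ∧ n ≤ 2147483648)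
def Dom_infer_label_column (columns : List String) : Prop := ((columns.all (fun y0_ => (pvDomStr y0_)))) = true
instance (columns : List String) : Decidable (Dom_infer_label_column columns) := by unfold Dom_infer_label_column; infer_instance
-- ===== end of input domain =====

-- B replaces A's lowercase dict index + candidate loop by a single pass over the
-- columns keeping the column of minimal candidate rank (later column wins ties);
-- alternative decomposition, same results.

-- str(col).strip().lower(), the normalization both sources apply to a column name
def pvNorm (s : String) : String := PySem.Str.lower (PySem.Str.strip s)

def pvCandidates : List String :=
  ["label", "class", "target", "y", "outcome", "species", "result", "prediction"]

-- ===== PORT A =====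
-- 'for candidate in candidates: if candidate in lower_map: return lower_map[candidate]'
def pvLoopA (lower_map : PySem.Dict String String) : List String → Option String
  | [] => none
  | cand :: rest =>
    match PySem.Dict.get? lower_map cand with
    | some v => some v
    | none => pvLoopA lower_map rest

def infer_label_column (columns : List String) : Option String :=
  let lower_map : PySem.Dict String String :=
    columns.foldl (fun d col => d.insert (pvNorm col) col) PySem.Dict.empty
  match pvLoopA lower_map pvCandidates with
  | some v => some v
  | none => if columns = [] then none else PySem.List.pyGet? columns (-1)

-- ===== PORT B =====
-- B's helper rank(name): index of name in candidates, counting with i, else None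
def pvRank (name : String) : List String → Int → Option Int
  | [], _ => none
  | c :: rest, i => if c = name then some i else pvRank name rest (i + 1)

-- one step of B's loop body: update best = (rank, col) when r is a rank and
-- (best is None or r <= best[0])
def pvStepG (cands : List String) (best : Option (Int × String)) (col : String) :
    Option (Int × String) :=
  match pvRank (pvNorm col) cands 0 with
  | none => best
  | some r =>
    match best with
    | none => some (r, col)
    | some (br, _) => if r ≤ br then some (r, col) else best

def infer_label_column_alt (columns : List String) : Option String :=
  match columns.foldl (pvStepG pvCandidates) none with
  | some (_, col) => some col
  | none => if columns = [] then none else PySem.List.pyGet? columns (-1)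

-- ===== PRECONDITION & SPEC =====
def Spec_infer_label_column (columns : List String) (out : Option String) : Prop := out = infer_label_column_alt columns
instance (columns : List String) (out : Option String) : Decidable (Spec_infer_label_column columns out) := by unfold Spec_infer_label_column; infer_instance

-- ===== CLAIM (what is proved, stated in full; the proofs are below) =====
def Claim_equal_infer_label_column : Prop := ∀ (columns : List String), Dom_infer_label_column columns → Spec_infer_label_column columns (infer_label_column columns)

-- ===== LEMMAS AND PROOFS =====

-- proof-side bridge: last column whose normalization is cand (dict-overwrite order)
def pvScanB (cand : String) (columns : List String) : Option String :=
  columns.foldl (fun acc col => if pvNorm col = cand then some col else acc) none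

-- proof-side bridge: A's candidate loop expressed with pvScanB
def pvLoopB (columns : List String) : List String → Option String
  | [] => none
  | cand :: rest =>
    match pvScanB cand columns with
    | some v => some v
    | none => pvLoopB columns rest

-- restarting the last-match fold from accumulator a: a later match overrides a
lemma pvScan_init (p : String → Prop) [DecidablePred p] (cs : List String) (a : Option String) :
    cs.foldl (fun acc col => if p col then some col else acc) a
      = match cs.foldl (fun acc col => if p col then some col else acc) none with
        | some v => some v
        | none => a := by
  induction cs generalizing a with
  | nil => simp
  | cons c cs ih =>
    simp only [List.foldl_cons]
    by_cases h : p c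
    · simp only [if_pos h]
      rw [ih (some c)]
      cases List.foldl (fun acc col => if p col then some col else acc) none cs <;> rfl
    · simp only [if_neg h]
      rw [ih a]

-- looking up cand in A's folded dict = the last-match scan, falling back to the start dict
lemma pvDict_scan (cs : List String) (d : PySem.Dict String String) (cand : String) :
    PySem.Dict.get? (cs.foldl (fun d col => d.insert (pvNorm col) col) d) cand
      = match pvScanB cand cs with
        | some v => some v
        | none => PySem.Dict.get? d cand := by
  induction cs generalizing d with
  | nil => simp [pvScanB]
  | cons c cs ih =>
    simp only [List.foldl_cons]
    rw [ih]
    have hscan : pvScanB cand (c :: cs)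
        = match pvScanB cand cs with
          | some v => some v
          | none => if pvNorm c = cand then some c else none := by
      unfold pvScanB
      simp only [List.foldl_cons]
      exact pvScan_init (fun col => pvNorm col = cand) cs _
    rw [hscan]
    cases hs : pvScanB cand cs with
    | some v => rfl
    | none =>
      by_cases h : pvNorm c = cand
      · simp [h]
      · rw [show (match (none : Option String) with
              | some v => some v
              | none => PySem.Dict.get? (d.insert (pvNorm c) c) cand)
            = PySem.Dict.get? (d.insert (pvNorm c) c) cand from rfl]
        rw [PySem.Dict.get?_insert_of_ne d c (fun he => h he.symm)]
        simp [h]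

lemma pvLoops_eq (columns : List String) (cands : List String) :
    pvLoopA (columns.foldl (fun d col => d.insert (pvNorm col) col) PySem.Dict.empty) cands
      = pvLoopB columns cands := by
  induction cands with
  | nil => rfl
  | cons cand rest ih =>
    unfold pvLoopA pvLoopB
    rw [pvDict_scan]
    cases hs : pvScanB cand columns with
    | some v => simp
    | none => simpa [PySem.Dict.get?_empty] using ih

-- a found rank is at least the starting counter
lemma pvRank_ge (name : String) (cands : List String) :
    ∀ (i r : Int), pvRank name cands i = some r → i ≤ r := by
  induction cands with
  | nil => intro i r h; simp [pvRank] at h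
  | cons c cs ih =>
    intro i r h
    unfold pvRank at h
    by_cases hc : c = name
    · simp [hc] at h; omega
    · simp [hc] at h; have := ih (i + 1) r h; omega

-- shifting the rank counter
lemma pvRank_shift (name : String) (cands : List String) :
    ∀ (i : Int), pvRank name cands i = (pvRank name cands 0).map (· + i) := by
  induction cands with
  | nil => intro i; simp [pvRank]
  | cons c cs ih =>
    intro i
    by_cases hc : c = name
    · simp [pvRank, hc]
    · simp only [pvRank, if_neg hc]
      rw [ih (i + 1), ih (0 + 1)]
      cases pvRank name cs 0 with
      | none => simp
      | some r => simp only [Option.map_some, Option.some.injEq]; omega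

-- pvRank over a cons candidate list, counter shifted back to 0
lemma pvRank_cons (name c : String) (rest : List String) :
    pvRank name (c :: rest) 0
      = if c = name then some 0 else (pvRank name rest 0).map (· + 1) := by
  rw [show pvRank name (c :: rest) 0
        = if c = name then some 0 else pvRank name rest (0 + 1) from rfl]
  split_ifs with h
  · rfl
  · rw [pvRank_shift name rest (0 + 1)]
    cases pvRank name rest 0 <;> rfl

-- ranks stored by B's fold are nonnegative
lemma pvFold_nonneg (cands : List String) (columns : List String) :
    ∀ (acc : Option (Int × String)), (∀ p, acc = some p → 0 ≤ p.1) →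
      ∀ p, columns.foldl (pvStepG cands) acc = some p → 0 ≤ p.1 := by
  induction columns with
  | nil => intro acc hacc p h; exact hacc p h
  | cons col cols ih =>
    intro acc hacc p h
    simp only [List.foldl_cons] at h
    refine ih _ ?_ p h
    intro q hq
    unfold pvStepG at hq
    cases hr : pvRank (pvNorm col) cands 0 with
    | none => simp only [hr] at hq; exact hacc q hq
    | some r =>
      have hr0 : 0 ≤ r := pvRank_ge _ _ 0 r hr
      cases hac : acc with
      | none =>
        simp only [hr, hac, Option.some.injEq] at hq
        subst hq
        exact hr0
      | some p' =>
        obtain ⟨br, v⟩ := p'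
        simp only [hr, hac] at hq
        split_ifs at hq with hle
        · simp only [Option.some.injEq] at hq
          subst hq
          exact hr0
        · exact hacc q (hac.trans hq)

-- the fold with an empty candidate list does nothing
lemma pvFold_nil (columns : List String) :
    ∀ (acc : Option (Int × String)), columns.foldl (pvStepG []) acc = acc := by
  induction columns with
  | nil => intro acc; rfl
  | cons col cols ih => intro acc; simp only [List.foldl_cons]; rw [show pvStepG [] acc col = acc from rfl, ih]

-- last-match scan over a snoc
lemma pvScanB_snoc (cand : String) (xs : List String) (x : String) :
    pvScanB cand (xs ++ [x]) = if pvNorm x = cand then some x else pvScanB cand xs := by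
  unfold pvScanB
  rw [List.foldl_append]
  simp only [List.foldl_cons, List.foldl_nil]

-- characterization of B's fold for a cons candidate list
lemma pvFold_char (c : String) (rest : List String) (columns : List String) :
    columns.foldl (pvStepG (c :: rest)) none
      = match pvScanB c columns with
        | some v => some ((0 : Int), v)
        | none => (columns.foldl (pvStepG rest) none).map (fun p => (p.1 + 1, p.2)) := by
  induction columns using List.reverseRecOn with
  | nil => rfl
  | append_singleton xs x ih =>
    rw [List.foldl_append, List.foldl_append]
    simp only [List.foldl_cons, List.foldl_nil]
    rw [ih, pvScanB_snoc]
    by_cases hc : pvNorm x = c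
    · -- x matches candidate c: new best is (0, x)
      rw [if_pos hc]
      cases hs : pvScanB c xs with
      | some v =>
        unfold pvStepG
        rw [pvRank_cons, if_pos hc.symm]
        rfl
      | none =>
        cases hG : xs.foldl (pvStepG rest) none with
        | none =>
          unfold pvStepG
          rw [pvRank_cons, if_pos hc.symm]
          rfl
        | some p =>
          obtain ⟨r, v⟩ := p
          have h0 : 0 ≤ r := pvFold_nonneg rest xs none (by simp) (r, v) hG
          unfold pvStepG
          rw [pvRank_cons, if_pos hc.symm]
          simp [show (0 : Int) ≤ r + 1 by omega]
    · rw [if_neg hc]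
      cases hs : pvScanB c xs with
      | some v =>
        unfold pvStepG
        rw [pvRank_cons, if_neg (fun h => hc h.symm)]
        cases hr : pvRank (pvNorm x) rest 0 with
        | none => rfl
        | some r =>
          have hr0 : 0 ≤ r := pvRank_ge _ _ 0 r hr
          simp [show ¬ (r + 1 ≤ (0 : Int)) by omega]
      | none =>
        cases hG : xs.foldl (pvStepG rest) none with
        | none =>
          unfold pvStepG
          rw [pvRank_cons, if_neg (fun h => hc h.symm)]
          cases hr : pvRank (pvNorm x) rest 0 with
          | none => rfl
          | some r => rfl
        | some p =>
          obtain ⟨br, v⟩ := p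
          unfold pvStepG
          rw [pvRank_cons, if_neg (fun h => hc h.symm)]
          cases hr : pvRank (pvNorm x) rest 0 with
          | none => rfl
          | some r =>
            by_cases hle : r ≤ br
            · simp [if_pos hle, show r + 1 ≤ br + 1 by omega]
            · simp [if_neg hle, show ¬ (r + 1 ≤ br + 1) by omega]

-- A's candidate loop = projection of B's single-pass fold
lemma pvLoopB_eq_fold (cands : List String) (columns : List String) :
    pvLoopB columns cands = (columns.foldl (pvStepG cands) none).map Prod.snd := by
  induction cands with
  | nil => rw [pvFold_nil]; rfl
  | cons c rest ih =>
    unfold pvLoopB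
    rw [pvFold_char]
    cases hs : pvScanB c columns with
    | some v => simp
    | none =>
      simp only [Option.map_map]
      rw [ih]
      cases columns.foldl (pvStepG rest) none <;> rfl

-- ===== VERDICT (by name: the statement is the Claim_ definition above) =====
theorem infer_label_column_spec : Claim_equal_infer_label_column := by
  intro columns _
  show (match pvLoopA (List.foldl (fun d col => d.insert (pvNorm col) col) PySem.Dict.empty columns) pvCandidates with
        | some v => some v
        | none => if columns = [] then none else PySem.List.pyGet? columns (-1))
      = infer_label_column_alt columns
  rw [pvLoops_eq, pvLoopB_eq_fold]
  unfold infer_label_column_alt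
  cases columns.foldl (pvStepG pvCandidates) none with
  | none => rfl
  | some p => obtain ⟨r, v⟩ := p; rfl
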